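-- pv_equiv track=rewrite | github.com/sup3rflyer/DesktopLUT | tools/generate_blue_noise.py | format_cpp_array
-- ===== SOURCE A (Python) =====
-- def format_cpp_array(pixels, name="g_blueNoiseData"):
--     """Format pixel data as a C++ array."""
--     lines = []
--     lines.append(f"// 64x64 blue noise texture data (single channel, 8-bit)")
--     lines.append(f"// Source: momentsingraphics.de (Christoph Peters) - CC0 Public Domain")
--     lines.append(f"// Downloaded from free-blue-noise-textures repository")
--     lines.append(f"static const unsigned char {name}[64 * 64] = {{")
--
--     # Format 16 values per line for readability
--     for row in range(64):
--         row_values = pixels[row * 64 : (row + 1) * 64]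
--         # Split into chunks of 16
--         for chunk_start in range(0, 64, 16):
--             chunk = row_values[chunk_start:chunk_start + 16]
--             formatted = ",".join(f"{v:3d}" for v in chunk)
--             if row == 63 and chunk_start == 48:
--                 lines.append(f"    {formatted}")  # Last line, no trailing comma
--             else:
--                 lines.append(f"    {formatted},")
--
--     lines.append("};")
--     return "\n".join(lines)
-- ===== SOURCE B (Python) =====
-- def format_cpp_array(pixels, name="g_blueNoiseData"):
--     """Format pixel data as a C++ array."""
--     def line(i):
--         return "    " + ",".join(f"{v:3d}" for v in pixels[i:i + 16])
--
--     def body(i):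
--         # base case: the final data line carries no trailing comma
--         if i >= 4080:
--             return line(i)
--         return line(i) + ",\n" + body(i + 16)
--
--     return (
--         "// 64x64 blue noise texture data (single channel, 8-bit)\n"
--         "// Source: momentsingraphics.de (Christoph Peters) - CC0 Public Domain\n"
--         "// Downloaded from free-blue-noise-textures repository\n"
--         f"static const unsigned char {name}[64 * 64] = {{\n"
--         + body(0) + "\n};"
--     )
-- ===== Notes on version B (the rewrite author's own statement) =====
-- stated objective: alternative
-- what changed: Replaces A's nested row/chunk loops, line list, last-line conditional and '\n'.join by a recursive descent over chunk start indices whose base case is the final (comma-less) line, concatenating strings directly.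
import Mathlib
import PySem

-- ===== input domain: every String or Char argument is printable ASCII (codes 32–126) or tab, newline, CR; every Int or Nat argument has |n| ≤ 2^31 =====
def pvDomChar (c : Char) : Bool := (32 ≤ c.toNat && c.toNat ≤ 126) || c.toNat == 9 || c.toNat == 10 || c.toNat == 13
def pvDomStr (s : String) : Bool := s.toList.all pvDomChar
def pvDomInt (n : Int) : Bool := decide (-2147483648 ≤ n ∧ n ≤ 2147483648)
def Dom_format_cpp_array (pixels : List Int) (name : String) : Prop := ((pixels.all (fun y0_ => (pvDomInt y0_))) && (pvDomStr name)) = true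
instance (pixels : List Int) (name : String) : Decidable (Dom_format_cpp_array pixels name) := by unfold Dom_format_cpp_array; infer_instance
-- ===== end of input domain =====

-- B replaces A's nested row/chunk loops, line list, last-line conditional and "\n".join by a
-- recursive descent over chunk start indices whose base case is the final comma-less line
-- (objective: alternative decomposition, same cost).

-- shared helper: Python's f"{v:3d}" (right-aligned, minimum width 3, space fill)
def pvFmt3 (v : Int) : String :=
  String.ofList (List.replicate (3 - (PySem.Int.toChars v).length) ' ' ++ PySem.Int.toChars v)

-- ===== PORT A =====
def format_cpp_array (pixels : List Int) (name : String) : String :=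
  let lines : List String :=
    ["// 64x64 blue noise texture data (single channel, 8-bit)",
     "// Source: momentsingraphics.de (Christoph Peters) - CC0 Public Domain",
     "// Downloaded from free-blue-noise-textures repository",
     "static const unsigned char " ++ name ++ "[64 * 64] = {"]
  let lines := (PySem.List.pyRange 0 64 1).foldl (fun lines row =>
      let row_values := PySem.List.slice pixels (some (row * 64)) (some ((row + 1) * 64))
      (PySem.List.pyRange 0 64 16).foldl (fun lines chunk_start =>
        let chunk := PySem.List.slice row_values (some chunk_start) (some (chunk_start + 16))
        let formatted := PySem.Str.join "," (chunk.map pvFmt3)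
        if row == 63 && chunk_start == 48 then
          lines ++ ["    " ++ formatted]
        else
          lines ++ ["    " ++ formatted ++ ","]) lines) lines
  PySem.Str.join "\n" (lines ++ ["};"])

-- ===== PORT B =====
-- B's helper line(i): one formatted data line for the 16-value chunk starting at flat index i
def pvLineB (pixels : List Int) (i : Nat) : String :=
  "    " ++ PySem.Str.join "," ((PySem.List.slice pixels (some (i : Int)) (some ((i : Int) + 16))).map pvFmt3)

-- B's helper body(i): recursive descent over chunk starts; the base case is the last line (no comma)
def pvBodyB (pixels : List Int) (i : Nat) : String :=
  if 4080 ≤ i then pvLineB pixels i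
  else pvLineB pixels i ++ ",\n" ++ pvBodyB pixels (i + 16)
termination_by 4080 - i

def format_cpp_array_alt (pixels : List Int) (name : String) : String :=
  "// 64x64 blue noise texture data (single channel, 8-bit)\n" ++
  "// Source: momentsingraphics.de (Christoph Peters) - CC0 Public Domain\n" ++
  "// Downloaded from free-blue-noise-textures repository\n" ++
  "static const unsigned char " ++ name ++ "[64 * 64] = {\n" ++
  pvBodyB pixels 0 ++ "\n};"

-- ===== PRECONDITION & SPEC =====
def Spec_format_cpp_array (pixels : List Int) (name : String) (out : String) : Prop := out = format_cpp_array_alt pixels name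
instance (pixels : List Int) (name : String) (out : String) : Decidable (Spec_format_cpp_array pixels name out) := by unfold Spec_format_cpp_array; infer_instance

-- ===== CLAIM (what is proved, stated in full; the proofs are below) =====
def Claim_equal_format_cpp_array : Prop := ∀ (pixels : List Int) (name : String), Dom_format_cpp_array pixels name → Spec_format_cpp_array pixels name (format_cpp_array pixels name)

-- ===== LEMMAS AND PROOFS =====

-- one formatted chunk line (no trailing comma), addressed by its flat start index
def pvChunk (p : List Int) (i : Int) : String :=
  "    " ++ PySem.Str.join "," ((PySem.List.slice p (some i) (some (i + 16))).map pvFmt3)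

-- the four chunk lines of one row, flat-indexed
def pvRow (p : List Int) (r : Int) : List String :=
  [pvChunk p (r*64), pvChunk p (r*64+16), pvChunk p (r*64+32), pvChunk p (r*64+48)]

lemma pvR16 : PySem.List.pyRange 0 64 16 = [0, 16, 32, 48] := by decide

-- row-then-chunk slicing equals flat slicing (16 divides 64)
lemma pvSliceComp (p : List Int) (r c : Int) (hr : 0 ≤ r) (hc : 0 ≤ c) (h16 : c + 16 ≤ 64) :
    PySem.List.slice (PySem.List.slice p (some (r * 64)) (some ((r + 1) * 64))) (some c) (some (c + 16))
      = PySem.List.slice p (some (r * 64 + c)) (some (r * 64 + c + 16)) := by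
  obtain ⟨a, rfl⟩ := Int.eq_ofNat_of_zero_le hr
  obtain ⟨b, rfl⟩ := Int.eq_ofNat_of_zero_le hc
  have e1 : ((a:Int)) * 64 = ((a*64 : Nat) : Int) := by push_cast; ring
  have e2 : ((a:Int) + 1) * 64 = ((a*64 + 64 : Nat) : Int) := by push_cast; ring
  have e3 : ((b:Int)) + 16 = ((b + 16 : Nat) : Int) := by push_cast; ring
  have e4 : (((a*64 : Nat) : Int) + (b:Int)) = ((a*64 + b : Nat) : Int) := by push_cast; ring
  have e5 : (((a*64 + b : Nat) : Int) + 16 : Int) = ((a*64 + b + 16 : Nat) : Int) := by push_cast; ring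
  rw [e1, e2, e3, e4, e5, PySem.List.slice_natCast, PySem.List.slice_natCast, PySem.List.slice_natCast]
  rw [List.drop_take, List.take_take, List.drop_drop]
  have : min (b + 16 - b) (a * 64 + 64 - a * 64 - b) = a * 64 + b + 16 - (a * 64 + b) := by omega
  rw [this]

lemma pvChunkA (p : List Int) (r c : Int) (hr : 0 ≤ r) (hc : 0 ≤ c) (h16 : c + 16 ≤ 64) :
    "    " ++ PySem.Str.join "," ((PySem.List.slice (PySem.List.slice p (some (r * 64)) (some ((r + 1) * 64))) (some c) (some (c + 16))).map pvFmt3)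
      = pvChunk p (r * 64 + c) := by
  rw [pvChunk, pvSliceComp p r c hr hc h16]

lemma pvJoin_singleton (sep x : String) : PySem.Str.join sep [x] = x := by
  unfold PySem.Str.join
  rw [List.map_cons, List.map_nil, PySem.Chars.join_singleton, String.ofList_toList]

lemma pvJoin_cons (sep a : String) (l : List String) (h : l ≠ []) :
    PySem.Str.join sep (a :: l) = a ++ sep ++ PySem.Str.join sep l := by
  cases l with
  | nil => exact absurd rfl h
  | cons b t =>
    unfold PySem.Str.join
    rw [List.map_cons, List.map_cons, PySem.Chars.join_cons_cons]
    simp [String.ofList_append, String.ofList_toList]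
    rw [String.append_assoc]

lemma pvJoin_append_last (sep x : String) : ∀ (l : List String), l ≠ [] →
    PySem.Str.join sep (l ++ [x]) = PySem.Str.join sep l ++ sep ++ x := by
  intro l
  induction l with
  | nil => intro h; exact absurd rfl h
  | cons a t ih =>
    intro _
    cases t with
    | nil =>
      simp only [List.cons_append, List.nil_append]
      rw [pvJoin_cons sep a [x] (by simp), pvJoin_singleton, pvJoin_singleton]
    | cons b u =>
      rw [List.cons_append, pvJoin_cons sep a ((b :: u) ++ [x]) (by simp),
          ih (by simp), pvJoin_cons sep a (b :: u) (by simp)]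
      simp [String.append_assoc]

-- "\n".join over all-but-last-comma'd lines is ",\n".join over the plain lines
lemma pvJoin_comma : ∀ (L : List String) (x : String),
    PySem.Str.join "\n" (L.map (· ++ ",") ++ [x]) = PySem.Str.join ",\n" (L ++ [x]) := by
  intro L
  induction L with
  | nil => intro x; simp only [List.map_nil, List.nil_append]; rw [pvJoin_singleton, pvJoin_singleton]
  | cons a t ih =>
    intro x
    rw [List.map_cons, List.cons_append, List.cons_append,
        pvJoin_cons "\n" (a ++ ",") (t.map (· ++ ",") ++ [x]) (by simp),
        pvJoin_cons ",\n" a (t ++ [x]) (by simp), ih]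
    have hsep : (",\n" : String) = "," ++ "\n" := by decide
    rw [hsep]
    simp [String.append_assoc]

-- A's double loop produces exactly the flat chunk lines, all but the last with a comma
lemma pvA_body (p : List Int) (acc : List String) :
    (PySem.List.pyRange 0 64 1).foldl (fun lines row =>
      let row_values := PySem.List.slice p (some (row * 64)) (some ((row + 1) * 64))
      (PySem.List.pyRange 0 64 16).foldl (fun lines chunk_start =>
        let chunk := PySem.List.slice row_values (some chunk_start) (some (chunk_start + 16))
        let formatted := PySem.Str.join "," (chunk.map pvFmt3)
        if row == 63 && chunk_start == 48 then
          lines ++ ["    " ++ formatted]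
        else
          lines ++ ["    " ++ formatted ++ ","]) lines) acc
    = acc ++ ((PySem.List.pyRange 0 63 1).flatMap (fun r => (pvRow p r).map (· ++ ",")))
        ++ [pvChunk p (63*64) ++ ",", pvChunk p (63*64+16) ++ ",", pvChunk p (63*64+32) ++ ",",
            pvChunk p (63*64+48)] := by
  have hsplit : PySem.List.pyRange 0 64 1 = PySem.List.pyRange 0 63 1 ++ [63] := by
    have h := PySem.List.pyRange_one_succ_right (a := 0) (b := 63) (by norm_num)
    norm_num at h
    exact h
  rw [hsplit, List.foldl_append]
  rw [PySem.List.foldl_congr_mem _ _ (fun lines r => lines ++ (pvRow p r).map (· ++ ",")) acc ?side]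
  case side =>
    intro lines r hmem
    obtain ⟨h0, h63⟩ := PySem.List.mem_pyRange_one.mp hmem
    have hne : (r == (63:Int)) = false := beq_eq_false_iff_ne.mpr (by omega)
    rw [pvR16]
    simp only [List.foldl_cons, List.foldl_nil]
    rw [pvChunkA p r 0 h0 (by norm_num) (by norm_num),
        pvChunkA p r 16 h0 (by norm_num) (by norm_num),
        pvChunkA p r 32 h0 (by norm_num) (by norm_num),
        pvChunkA p r 48 h0 (by norm_num) (by norm_num)]
    simp [hne, pvRow]
  rw [PySem.List.foldl_append_eq_flatMap]
  simp only [List.foldl_cons, List.foldl_nil]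
  rw [pvR16]
  simp only [List.foldl_cons, List.foldl_nil]
  rw [pvChunkA p 63 0 (by norm_num) (by norm_num) (by norm_num),
      pvChunkA p 63 16 (by norm_num) (by norm_num) (by norm_num),
      pvChunkA p 63 32 (by norm_num) (by norm_num) (by norm_num),
      pvChunkA p 63 48 (by norm_num) (by norm_num) (by norm_num)]
  norm_num [List.append_assoc]

-- B's line(i) is pvChunk at the same flat index
lemma pvLineB_eq (p : List Int) (i : Nat) : pvLineB p i = pvChunk p (i : Int) := rfl

-- unrolling a map over range (k+2) into head and shifted tail
lemma pvRangeMapSucc (f : Nat → String) (k : Nat) :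
    (List.range (k+1+1)).map f = f 0 :: (List.range (k+1)).map (fun j => f (j+1)) := by
  rw [List.range_succ_eq_map, List.map_cons, List.map_map]
  rfl

-- B's recursion unrolls to a ",\n"-join of the chunk lines from i up to 4080
set_option maxHeartbeats 1000000 in
lemma pvBodyB_eq (p : List Int) : ∀ (k i : Nat), i + 16 * k = 4080 →
    pvBodyB p i = PySem.Str.join ",\n" ((List.range (k+1)).map (fun j => pvChunk p ((i + 16*j : Nat) : Int))) := by
  intro k
  induction k with
  | zero =>
    intro i h
    rw [pvBodyB]
    have : 4080 ≤ i := by omega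
    simp only [this, if_true]
    rw [List.range_one, List.map_cons, List.map_nil, pvJoin_singleton, pvLineB_eq]
    norm_num
  | succ k ih =>
    intro i h
    rw [pvBodyB]
    have hlt : ¬ (4080 ≤ i) := by omega
    simp only [hlt, if_false]
    rw [ih (i + 16) (by omega), pvLineB_eq]
    rw [pvRangeMapSucc (fun j => pvChunk p ((i + 16*j : Nat) : Int)) k]
    have hmap : ((List.range (k+1)).map (fun j => pvChunk p ((i + 16*(j+1) : Nat) : Int)))
        = (List.range (k+1)).map (fun j => pvChunk p ((i + 16 + 16*j : Nat) : Int)) := by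
      apply List.map_congr_left
      intro a _
      have ha : i + 16*(a+1) = i + 16 + 16*a := by omega
      rw [ha]
    rw [hmap, pvJoin_cons ",\n" _ _ (by simp)]
    have hh : i + 16*0 = i := by omega
    rw [hh]

-- B's body is the ",\n"-join of exactly A's chunk lines
set_option maxRecDepth 2000000 in
set_option maxHeartbeats 1000000 in
lemma pvB_body (p : List Int) :
    pvBodyB p 0 = PySem.Str.join ",\n"
      (((PySem.List.pyRange 0 63 1).flatMap (fun r => pvRow p r)
        ++ [pvChunk p (63*64), pvChunk p (63*64+16), pvChunk p (63*64+32)]) ++ [pvChunk p (63*64+48)]) := by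
  rw [pvBodyB_eq p 255 0 (by norm_num)]
  congr 1

set_option maxRecDepth 40000 in
lemma pvMain (pixels : List Int) (name : String) :
    format_cpp_array pixels name = format_cpp_array_alt pixels name := by
  simp only [format_cpp_array, format_cpp_array_alt]
  rw [pvA_body pixels, pvB_body pixels]
  have hmap : ((PySem.List.pyRange 0 63 1).flatMap (fun r => (pvRow pixels r).map (· ++ ",")))
      ++ [pvChunk pixels (63*64) ++ ",", pvChunk pixels (63*64+16) ++ ",", pvChunk pixels (63*64+32) ++ ","]
      = ((PySem.List.pyRange 0 63 1).flatMap (fun r => pvRow pixels r)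
          ++ [pvChunk pixels (63*64), pvChunk pixels (63*64+16), pvChunk pixels (63*64+32)]).map (· ++ ",") := by
    simp [List.map_flatMap]
  have hregroup :
      ([("// 64x64 blue noise texture data (single channel, 8-bit)" : String),
        "// Source: momentsingraphics.de (Christoph Peters) - CC0 Public Domain",
        "// Downloaded from free-blue-noise-textures repository",
        "static const unsigned char " ++ name ++ "[64 * 64] = {"]
        ++ ((PySem.List.pyRange 0 63 1).flatMap (fun r => (pvRow pixels r).map (· ++ ",")))
        ++ [pvChunk pixels (63*64) ++ ",", pvChunk pixels (63*64+16) ++ ",", pvChunk pixels (63*64+32) ++ ",",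
            pvChunk pixels (63*64+48)]) ++ ["};"]
      = ("// 64x64 blue noise texture data (single channel, 8-bit)" : String) ::
        "// Source: momentsingraphics.de (Christoph Peters) - CC0 Public Domain" ::
        "// Downloaded from free-blue-noise-textures repository" ::
        ("static const unsigned char " ++ name ++ "[64 * 64] = {") ::
        ((((PySem.List.pyRange 0 63 1).flatMap (fun r => pvRow pixels r)
            ++ [pvChunk pixels (63*64), pvChunk pixels (63*64+16), pvChunk pixels (63*64+32)]).map (· ++ ",")
          ++ [pvChunk pixels (63*64+48)]) ++ ["};"]) := by
    rw [← hmap]; simp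
  rw [hregroup]
  rw [pvJoin_cons _ _ _ (by simp), pvJoin_cons _ _ _ (by simp), pvJoin_cons _ _ _ (by simp),
      pvJoin_cons _ _ _ (by simp)]
  rw [pvJoin_append_last _ _ _ (by simp), pvJoin_comma]
  have d1 : ("// 64x64 blue noise texture data (single channel, 8-bit)\n" : String)
      = "// 64x64 blue noise texture data (single channel, 8-bit)" ++ "\n" := by decide
  have d2 : ("// Source: momentsingraphics.de (Christoph Peters) - CC0 Public Domain\n" : String)
      = "// Source: momentsingraphics.de (Christoph Peters) - CC0 Public Domain" ++ "\n" := by decide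
  have d3 : ("// Downloaded from free-blue-noise-textures repository\n" : String)
      = "// Downloaded from free-blue-noise-textures repository" ++ "\n" := by decide
  have d4 : ("[64 * 64] = {\n" : String) = "[64 * 64] = {" ++ "\n" := by decide
  have d5 : ("\n};" : String) = "\n" ++ "};" := by decide
  rw [d1, d2, d3, d4, d5]
  simp [String.append_assoc]
  simp only [← String.append_assoc]
  congr 1

-- ===== VERDICT (by name: the statement is the Claim_ definition above) =====
theorem format_cpp_array_spec : Claim_equal_format_cpp_array := by
  intro pixels name _
  unfold Spec_format_cpp_array
  exact pvMain pixels name
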